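-- pv_equiv track=rewrite | github.com/Bagi4-source/Python-Lessons | Lab1/Task15_19.py | task15
-- ===== SOURCE A (Python) =====
-- def task15(arr: list[int]) -> int:
--     max_item = arr[0]
--     count = 0
--     for item in arr:
--         count += 1
--         if item >= max_item:
--             max_item = item
--             count = 0
--
--     return count
-- ===== SOURCE B (Python) =====
-- def task15(arr: list[int]) -> int:
--     m = arr[0]
--     for x in arr:
--         if x > m:
--             m = x
--     cnt = 0
--     for x in reversed(arr):
--         if x == m:
--             return cnt
--         cnt += 1
--     return cnt
-- ===== Notes on version B (the rewrite author's own statement) =====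
-- stated objective: alternative
-- what changed: A's single running-max-with-reset pass is replaced by find-the-maximum then count elements after its last occurrence by scanning from the end.
import Mathlib
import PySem

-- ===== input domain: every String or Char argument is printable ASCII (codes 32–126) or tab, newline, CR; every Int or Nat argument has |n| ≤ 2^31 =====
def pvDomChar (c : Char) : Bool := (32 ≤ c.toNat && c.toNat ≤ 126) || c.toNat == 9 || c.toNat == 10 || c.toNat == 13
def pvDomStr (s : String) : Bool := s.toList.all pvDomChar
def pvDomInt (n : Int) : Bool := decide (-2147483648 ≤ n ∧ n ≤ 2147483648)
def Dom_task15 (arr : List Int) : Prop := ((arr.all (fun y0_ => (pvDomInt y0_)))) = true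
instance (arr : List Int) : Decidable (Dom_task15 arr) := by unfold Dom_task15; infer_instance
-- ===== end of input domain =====

-- B replaces A's running-max-with-reset pass by find-max then count-from-the-end to its last occurrence (alternative decomposition, same O(n)).
-- ===== PORT A =====
def astep (s : Int × Int) (item : Int) : Int × Int :=
  let c := s.2 + 1
  if item ≥ s.1 then (item, 0) else (s.1, c)

def task15 (arr : List Int) : Int :=
  match arr with
  | [] => 0  -- Python: arr[0] raises IndexError; excluded by Pre_task15
  | h :: _ => (arr.foldl astep (h, 0)).2

-- ===== PORT B =====
def bmax (m x : Int) : Int := if x > m then x else m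

def bcount : List Int → Int → Int
  | [], _ => 0
  | x :: xs, m => if x = m then 0 else bcount xs m + 1

def task15_alt (arr : List Int) : Int :=
  match arr with
  | [] => 0  -- Python: arr[0] raises IndexError; excluded by Pre_task15
  | h :: _ =>
    let m := arr.foldl bmax h
    bcount arr.reverse m

-- ===== PRECONDITION & SPEC =====
-- Pre_ excludes only the empty list, on which both Pythons raise IndexError.
def Pre_task15 (arr : List Int) : Prop := arr ≠ []
instance (arr : List Int) : Decidable (Pre_task15 arr) := by unfold Pre_task15; infer_instance
def pvWitness_task15 : List Int := [1, 3, 2]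
def Spec_task15 (arr : List Int) (out : Int) : Prop := out = task15_alt arr
instance (arr : List Int) (out : Int) : Decidable (Spec_task15 arr out) := by unfold Spec_task15; infer_instance

-- ===== CLAIM (what is proved, stated in full; the proofs are below) =====
def Claim_equal_task15 : Prop := ∀ (arr : List Int), Dom_task15 arr → Pre_task15 arr → Spec_task15 arr (task15 arr)

-- ===== LEMMAS AND PROOFS =====

lemma bmax_lt (m x : Int) (h : x < m) : bmax m x = m := by
  simp [bmax]; omega

lemma foldl_bmax_all_lt (l : List Int) (m : Int) (h : ∀ x ∈ l, x < m) :
    l.foldl bmax m = m := by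
  induction l with
  | nil => rfl
  | cons x xs ih =>
    simp only [List.foldl_cons]
    rw [bmax_lt m x (h x (by simp))]
    exact ih (fun y hy => h y (by simp [hy]))

lemma afold_eq (l : List Int) (m c : Int) :
    l.foldl astep (m, c) =
      (l.foldl bmax m,
       if ∀ x ∈ l, x < m then c + l.length else bcount l.reverse (l.foldl bmax m)) := by
  induction l using List.reverseRecOn generalizing c with
  | nil => simp
  | append_singleton l x ih =>
    rw [List.foldl_append, List.foldl_append, ih, List.reverse_append]
    by_cases hall : ∀ y ∈ l, y < m
    · rw [foldl_bmax_all_lt l m hall]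
      by_cases hx : m ≤ x
      · have h1 : ¬ (∀ y ∈ l ++ [x], y < m) := by
          intro h; have := h x (by simp); omega
        have h2 : bmax m x = x := by simp [bmax]; omega
        simp only [if_pos hall, h1, List.foldl_cons, List.foldl_nil, h2]
        simp [astep, bcount, hx]
      · have h1 : ∀ y ∈ l ++ [x], y < m := by
          intro y hy; rcases (by simpa using hy) with hy | hy
          · exact hall y hy
          · omega
        simp only [if_pos hall, if_pos h1, List.foldl_cons, List.foldl_nil]
        have h2 : bmax m x = m := by simp [bmax]; omega
        simp only [h2]
        simp only [astep]
        rw [if_neg (by omega)]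
        simp
        omega
    · have h1 : ¬ (∀ y ∈ l ++ [x], y < m) := by
        intro h; exact hall (fun y hy => h y (by simp [hy]))
      set M := l.foldl bmax m with hM
      simp only [if_neg hall, if_neg h1, List.foldl_cons, List.foldl_nil]
      by_cases hx : M ≤ x
      · have h2 : bmax M x = x := by simp [bmax]; omega
        simp [astep, bcount, hx, h2]
      · have h2 : bmax M x = M := by simp [bmax]; omega
        simp only [h2, astep]
        rw [if_neg (by omega)]
        simp [bcount]
        omega

-- ===== VERDICT (by name: the statement is the Claim_ definition above) =====
theorem task15_spec : Claim_equal_task15 := by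
  intro arr _ hpre
  unfold Spec_task15 task15 task15_alt
  match arr with
  | [] => exact absurd rfl hpre
  | h :: t =>
    simp only
    rw [afold_eq]
    have hne : ¬ (∀ x ∈ h :: t, x < h) := by
      intro hc; have := hc h (by simp); omega
    rw [if_neg hne]
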